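-- pv_equiv track=rewrite | github.com/jensenerik/aoc2024 | solutions/solution08.py | calc_antinode
-- ===== SOURCE A (Python) =====
-- from typing import Dict, List, Set, Tuple
--
-- def calc_antinode(
--     antenna_1: Tuple[int, int], antenna_2: Tuple[int, int], resonance: int | None
-- ) -> List[Tuple[int, int]]:
--     resonance_nums = range(resonance) if resonance else [2]
--     antinodes = []
--     for res_num in resonance_nums:
--         antinodes.append(
--             (
--                 res_num * antenna_1[0] - (res_num - 1) * antenna_2[0],
--                 res_num * antenna_1[1] - (res_num - 1) * antenna_2[1],
--             )
--         )
--     return antinodes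
-- ===== SOURCE B (Python) =====
-- def calc_antinode(antenna_1, antenna_2, resonance):
--     dx = antenna_1[0] - antenna_2[0]
--     dy = antenna_1[1] - antenna_2[1]
--     if resonance:
--         count = resonance
--         x, y = antenna_2[0], antenna_2[1]
--     else:
--         count = 1
--         x, y = antenna_2[0] + 2 * dx, antenna_2[1] + 2 * dy
--     out = []
--     for _ in range(count):
--         out.append((x, y))
--         x += dx
--         y += dy
--     return out
-- ===== Notes on version B (the rewrite author's own statement) =====
-- stated objective: alternative
-- what changed: B replaces the per-index closed form res_num*a1-(res_num-1)*a2 with an incremental running point started at a2 (or a2+2*delta in the falsy branch) and advanced by the step vector delta each iteration.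
import Mathlib
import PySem

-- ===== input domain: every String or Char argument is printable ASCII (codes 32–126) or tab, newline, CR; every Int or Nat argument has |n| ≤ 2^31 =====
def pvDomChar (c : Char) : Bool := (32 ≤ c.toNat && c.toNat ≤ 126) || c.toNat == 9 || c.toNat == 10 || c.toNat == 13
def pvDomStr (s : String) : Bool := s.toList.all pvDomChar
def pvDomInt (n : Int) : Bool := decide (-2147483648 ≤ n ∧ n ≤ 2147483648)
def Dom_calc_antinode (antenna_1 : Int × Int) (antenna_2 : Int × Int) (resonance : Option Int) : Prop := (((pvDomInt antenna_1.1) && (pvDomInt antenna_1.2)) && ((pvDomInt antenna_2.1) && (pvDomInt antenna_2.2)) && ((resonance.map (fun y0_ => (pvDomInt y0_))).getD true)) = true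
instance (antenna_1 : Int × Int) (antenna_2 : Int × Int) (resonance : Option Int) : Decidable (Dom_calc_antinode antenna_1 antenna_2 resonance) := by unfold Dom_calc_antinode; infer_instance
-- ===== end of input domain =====

-- B replaces the per-index closed form with an incremental running point advanced by the step
-- vector delta each iteration (alternative decomposition; same O(n) cost).

-- ===== PORT A =====
def calc_antinode (antenna_1 : Int × Int) (antenna_2 : Int × Int) (resonance : Option Int) : List (Int × Int) :=
  -- resonance_nums = range(resonance) if resonance else [2]  (None and 0 are falsy)
  let resonance_nums : List Int :=
    match resonance with
    | some r => if r ≠ 0 then PySem.List.pyRange 0 r 1 else [2]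
    | none => [2]
  resonance_nums.foldl
    (fun antinodes res_num =>
      antinodes ++ [(res_num * antenna_1.1 - (res_num - 1) * antenna_2.1,
                     res_num * antenna_1.2 - (res_num - 1) * antenna_2.2)])
    []

-- ===== PORT B =====
-- the 'for _ in range(count)' loop of Source B threading the running point (x, y)
def pvAltLoop (dx dy : Int) : Nat → Int → Int → List (Int × Int)
  | 0, _, _ => []
  | n + 1, x, y => (x, y) :: pvAltLoop dx dy n (x + dx) (y + dy)

def calc_antinode_alt (antenna_1 : Int × Int) (antenna_2 : Int × Int) (resonance : Option Int) : List (Int × Int) :=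
  let dx := antenna_1.1 - antenna_2.1
  let dy := antenna_1.2 - antenna_2.2
  match resonance with
  | some r =>
    if r ≠ 0 then pvAltLoop dx dy r.toNat antenna_2.1 antenna_2.2
    else pvAltLoop dx dy 1 (antenna_2.1 + 2 * dx) (antenna_2.2 + 2 * dy)
  | none => pvAltLoop dx dy 1 (antenna_2.1 + 2 * dx) (antenna_2.2 + 2 * dy)

-- ===== PRECONDITION & SPEC =====
def Spec_calc_antinode (antenna_1 : Int × Int) (antenna_2 : Int × Int) (resonance : Option Int) (out : List (Int × Int)) : Prop := out = calc_antinode_alt antenna_1 antenna_2 resonance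
instance (antenna_1 : Int × Int) (antenna_2 : Int × Int) (resonance : Option Int) (out : List (Int × Int)) : Decidable (Spec_calc_antinode antenna_1 antenna_2 resonance out) := by unfold Spec_calc_antinode; infer_instance

-- ===== CLAIM (what is proved, stated in full; the proofs are below) =====
def Claim_equal_calc_antinode : Prop := ∀ (antenna_1 : Int × Int) (antenna_2 : Int × Int) (resonance : Option Int), Dom_calc_antinode antenna_1 antenna_2 resonance → Spec_calc_antinode antenna_1 antenna_2 resonance (calc_antinode antenna_1 antenna_2 resonance)

-- ===== LEMMAS AND PROOFS =====

theorem pvAltLoop_eq_map (dx dy : Int) (n : Nat) (x y : Int) :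
    pvAltLoop dx dy n x y = (List.range n).map (fun (k : Nat) => (x + (k : Int) * dx, y + (k : Int) * dy)) := by
  induction n generalizing x y with
  | zero => simp [pvAltLoop]
  | succ m ih =>
    rw [List.range_succ_eq_map, List.map_cons, List.map_map]
    simp only [pvAltLoop, ih]
    congr 1
    · simp
    · apply List.map_congr_left
      intro k _
      simp only [Function.comp_apply, Nat.succ_eq_add_one, Prod.mk.injEq]
      push_cast
      constructor <;> ring

theorem pvFoldl_append_map {α β : Type} (f : α → β) (l : List α) (acc : List β) :
    l.foldl (fun a x => a ++ [f x]) acc = acc ++ l.map f := by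
  induction l generalizing acc with
  | nil => simp
  | cons h t ih => simp [ih]

-- ===== VERDICT (by name: the statement is the Claim_ definition above) =====
theorem calc_antinode_spec : Claim_equal_calc_antinode := by
  intro a1 a2 res _
  unfold Spec_calc_antinode calc_antinode calc_antinode_alt
  match res with
  | none =>
    simp [pvAltLoop]
    constructor <;> ring
  | some r =>
    by_cases h : r = 0
    · simp [h, pvAltLoop]
      constructor <;> ring
    · simp only [h, ne_eq, not_false_eq_true, if_true]
      rw [pvFoldl_append_map, pvAltLoop_eq_map, PySem.List.pyRange_one]
      simp only [List.nil_append, List.map_map, Int.sub_zero]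
      apply List.map_congr_left
      intro k _
      simp only [Function.comp_apply, Prod.mk.injEq]
      constructor <;> ring
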